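-- pv_equiv track=rewrite | github.com/aman1108/Interview-Coding-Questions | Dynamic Programming/Paritition Array for Maximum Sum.py | solve
-- ===== SOURCE A (Python) =====
-- def solve(arr,k):
--     n=len(arr)
--     DP=[0]*(n+1)
--
--     for i in range(n-1,-1,-1):
--         v=0
--         for j in range(i,min(i+k,n)):
--             v=max(arr[j],v)
--             DP[i]=max(DP[i],v*(j-i+1)+DP[j+1])
--     return DP[0]
-- ===== SOURCE B (Python) =====
-- def _window_maxes(arr, K):
--     # W[t-1][i] = max(0, arr[i], ..., arr[i+t-1]) for 0 <= i <= len(arr)-t,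
--     # built by widening each window by one (the 0 clip mirrors the task's 0-seeded block max)
--     n = len(arr)
--     prev = [max(x, 0) for x in arr]
--     W = [prev]
--     for t in range(2, K + 1):
--         prev = [max(prev[i], arr[i + t - 1]) for i in range(n - t + 1)]
--         W.append(prev)
--     return W
--
-- def _dp(arr, K, W):
--     # g[i] = best partition value of arr[:i]; the last block's value is a pure table lookup
--     n = len(arr)
--     g = [0]
--     for i in range(1, n + 1):
--         g.append(max(W[t - 1][i - t] * t + g[i - t] for t in range(1, min(K, i) + 1)))
--     return g[n]
--
-- def solve(arr, k):
--     K = min(k, len(arr))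
--     if K < 1:
--         return 0
--     return _dp(arr, K, _window_maxes(arr, K))
-- ===== Notes on version B (the rewrite author's own statement) =====
-- stated objective: alternative
-- what changed: A is a single backward suffix DP maintaining a running segment maximum inside the DP loop; B first precomputes sliding-window maximum tables for every block length up to k by repeated widening, then runs a forward prefix DP whose inner step is a pure max over table lookups (no running maximum in the DP).
import Mathlib
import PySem

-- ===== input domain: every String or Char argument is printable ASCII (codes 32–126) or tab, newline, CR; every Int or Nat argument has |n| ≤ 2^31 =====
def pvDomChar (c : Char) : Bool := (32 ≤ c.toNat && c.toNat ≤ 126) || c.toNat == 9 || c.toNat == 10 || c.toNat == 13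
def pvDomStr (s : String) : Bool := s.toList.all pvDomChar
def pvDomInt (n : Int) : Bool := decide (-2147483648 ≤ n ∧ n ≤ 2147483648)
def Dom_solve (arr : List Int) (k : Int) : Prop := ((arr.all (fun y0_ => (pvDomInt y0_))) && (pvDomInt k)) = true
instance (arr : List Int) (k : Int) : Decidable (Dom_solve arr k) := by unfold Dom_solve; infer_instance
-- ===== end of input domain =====

-- B replaces A's backward suffix DP with an inline running segment maximum by a staged
-- computation: sliding-window maximum tables for every block length, then a forward prefix DP
-- whose inner step is a pure max over table lookups (objective: alternative; same O(n*min(n,k)) time).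

-- ===== PORT A =====
-- all list indices/assignments below are in range on every input, so pyGetD/pySetD are exact
def solve (arr : List Int) (k : Int) : Int :=
  let n : Int := arr.length
  let DP : List Int := List.replicate (n.toNat + 1) 0
  let DP := (PySem.List.pyRange (n - 1) (-1) (-1)).foldl (fun DP i =>
    ((PySem.List.pyRange i (min (i + k) n) 1).foldl (fun (s : Int × List Int) j =>
      let v := max (PySem.List.pyGetD arr j 0) s.1
      (v, PySem.List.pySetD s.2 i
            (max (PySem.List.pyGetD s.2 i 0) (v * (j - i + 1) + PySem.List.pyGetD s.2 (j + 1) 0))))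
      (0, DP)).2) DP
  PySem.List.pyGetD DP 0 0

-- ===== PORT B =====
-- _window_maxes: W[t-1][i] = max(0, arr[i..i+t-1]), each row built by widening the previous one
def pvBRows (arr : List Int) (K : Int) : List (List Int) :=
  ((PySem.List.pyRange 2 (K + 1) 1).foldl
    (fun (s : List Int × List (List Int)) t =>
      let row := (PySem.List.pyRange 0 ((arr.length : Int) - t + 1) 1).map
        (fun i => max (PySem.List.pyGetD s.1 i 0) (PySem.List.pyGetD arr (i + t - 1) 0))
      (row, s.2 ++ [row]))
    (arr.map (fun x => max x 0), [arr.map (fun x => max x 0)])).2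

-- _dp: prefix DP; the generator's max is Python's max over a nonempty list (.getD 0 unreachable)
def pvBDP (arr : List Int) (K : Int) (W : List (List Int)) : List Int :=
  (PySem.List.pyRange 1 ((arr.length : Int) + 1) 1).foldl
    (fun g i =>
      g ++ [(PySem.List.max? ((PySem.List.pyRange 1 (min K i + 1) 1).map
        (fun t => PySem.List.pyGetD (PySem.List.pyGetD W (t - 1) []) (i - t) 0 * t +
          PySem.List.pyGetD g (i - t) 0)) (fun y => y)).getD 0])
    [0]

def solve_alt (arr : List Int) (k : Int) : Int :=
  let K : Int := min k (arr.length : Int)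
  if K < 1 then 0
  else PySem.List.pyGetD (pvBDP arr K (pvBRows arr K)) (arr.length : Int) 0

-- ===== PRECONDITION & SPEC =====
def Spec_solve (arr : List Int) (k : Int) (out : Int) : Prop := out = solve_alt arr k
instance (arr : List Int) (k : Int) (out : Int) : Decidable (Spec_solve arr k out) := by unfold Spec_solve; infer_instance

-- ===== CLAIM (what is proved, stated in full; the proofs are below) =====
def Claim_equal_solve : Prop := ∀ (arr : List Int) (k : Int), Dom_solve arr k → Spec_solve arr k (solve arr k)

-- ===== LEMMAS AND PROOFS =====

-- running max of a block, seeded with 0 exactly as A seeds v := 0 and B clips windows at 0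
def pvMax0 (l : List Int) : Int := l.foldl max 0

theorem pvMax0_append (l : List Int) (x : Int) :
    pvMax0 (l ++ [x]) = max (pvMax0 l) x := by
  simp only [pvMax0, List.foldl_append, List.foldl_cons, List.foldl_nil]

theorem pvMax0_nonneg (l : List Int) : 0 ≤ pvMax0 l := by
  have := PySem.List.le_foldl_max l 0
  exact this.1

-- a foldl of running max over a projection either keeps its seed or hits an element
theorem pvFoldl_max_proj_init_or_mem {α : Type} (l : List α) (f : α → Int) (a : Int) :
    l.foldl (fun acc x => max acc (f x)) a = a ∨
      ∃ x ∈ l, l.foldl (fun acc x => max acc (f x)) a = f x := by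
  induction l generalizing a with
  | nil => exact Or.inl rfl
  | cons y t ih =>
    rcases ih (max a (f y)) with h | ⟨x, hx, hfx⟩
    · rcases max_choice a (f y) with hm | hm
      · exact Or.inl (by simpa [hm] using h)
      · exact Or.inr ⟨y, by simp, by simpa [hm] using h⟩
    · exact Or.inr ⟨x, by simp [hx], hfx⟩

theorem pvAttach_foldl {α β : Type} (l : List α) (f : β → α → β) (a : β) :
    l.attach.foldl (fun acc x => f acc x.1) a = l.foldl f a := by
  induction l generalizing a with
  | nil => rfl
  | cons x t ih => simp [List.attach, List.attachWith, List.foldl_pmap]; exact ih (f a x)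

-- the value of the optimal partition of xs into blocks of length ≤ k, peeling the FIRST block
def pvF (k : Int) (xs : List Int) : Int :=
  (PySem.List.pyRange 1 (min k (xs.length : Int) + 1) 1).attach.foldl
    (fun acc t =>
      max acc (pvMax0 (xs.take t.1.toNat) * t.1 + pvF k (xs.drop t.1.toNat)))
    0
termination_by xs.length
decreasing_by
  have h := PySem.List.mem_pyRange_one.mp t.2
  simp only [List.length_drop]
  omega

-- the same optimum, peeling the LAST block
def pvG (k : Int) (xs : List Int) : Int :=
  (PySem.List.pyRange 1 (min k (xs.length : Int) + 1) 1).attach.foldl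
    (fun acc t =>
      max acc (pvMax0 (xs.drop (xs.length - t.1.toNat)) * t.1 +
        pvG k (xs.take (xs.length - t.1.toNat))))
    0
termination_by xs.length
decreasing_by
  have h := PySem.List.mem_pyRange_one.mp t.2
  simp only [List.length_take]
  omega

theorem pvF_eq (k : Int) (xs : List Int) :
    pvF k xs = (PySem.List.pyRange 1 (min k (xs.length : Int) + 1) 1).foldl
      (fun acc t => max acc (pvMax0 (xs.take t.toNat) * t + pvF k (xs.drop t.toNat))) 0 := by
  rw [pvF, pvAttach_foldl _
    (fun acc t => max acc (pvMax0 (xs.take t.toNat) * t + pvF k (xs.drop t.toNat)))]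

theorem pvG_eq (k : Int) (xs : List Int) :
    pvG k xs = (PySem.List.pyRange 1 (min k (xs.length : Int) + 1) 1).foldl
      (fun acc t => max acc (pvMax0 (xs.drop (xs.length - t.toNat)) * t +
        pvG k (xs.take (xs.length - t.toNat)))) 0 := by
  rw [pvG, pvAttach_foldl _
    (fun acc t => max acc (pvMax0 (xs.drop (xs.length - t.toNat)) * t +
      pvG k (xs.take (xs.length - t.toNat))))]

theorem pvF_nonneg (k : Int) (xs : List Int) : 0 ≤ pvF k xs := by
  rw [pvF]
  exact (PySem.List.le_foldl_max_int _ _ 0).1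

theorem pvG_nonneg (k : Int) (xs : List Int) : 0 ≤ pvG k xs := by
  rw [pvG]
  exact (PySem.List.le_foldl_max_int _ _ 0).1

theorem pvF_nil (k : Int) : pvF k [] = 0 := by
  rw [pvF_eq]
  rw [PySem.List.pyRange_one_eq_nil (by simp)]
  rfl

theorem pvG_nil (k : Int) : pvG k [] = 0 := by
  rw [pvG_eq]
  rw [PySem.List.pyRange_one_eq_nil (by simp)]
  rfl

theorem pvF_of_k_nonpos (k : Int) (hk : k ≤ 0) (xs : List Int) : pvF k xs = 0 := by
  rw [pvF_eq]
  rw [PySem.List.pyRange_one_eq_nil (by omega)]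
  rfl

theorem pvG_of_k_nonpos (k : Int) (hk : k ≤ 0) (xs : List Int) : pvG k xs = 0 := by
  rw [pvG_eq]
  rw [PySem.List.pyRange_one_eq_nil (by omega)]
  rfl

-- a partition of xs into nonempty blocks of length ≤ k
def pvIsPart (k : Int) (xs : List Int) (bs : List (List Int)) : Prop :=
  bs.flatten = xs ∧ ∀ b ∈ bs, b ≠ [] ∧ (b.length : Int) ≤ k

def pvScore (bs : List (List Int)) : Int :=
  (bs.map (fun b => pvMax0 b * (b.length : Int))).sum

theorem pvScore_le_pvF (k : Int) : ∀ (bs : List (List Int)) (xs : List Int),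
    pvIsPart k xs bs → pvScore bs ≤ pvF k xs := by
  intro bs
  induction bs with
  | nil =>
    intro xs ⟨hfl, _⟩
    simp only [List.flatten_nil] at hfl
    subst hfl
    simpa [pvScore] using pvF_nonneg k []
  | cons b t ih =>
    intro xs ⟨hfl, hblocks⟩
    simp only [List.flatten_cons] at hfl
    obtain ⟨hb, hbk⟩ := hblocks b (by simp)
    have hbl : 1 ≤ b.length := List.length_pos_iff.mpr hb
    have hmem : (b.length : Int) ∈ PySem.List.pyRange 1 (min k (xs.length : Int) + 1) 1 := by
      apply PySem.List.mem_pyRange_one.mpr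
      constructor
      · exact_mod_cast hbl
      · have : b.length ≤ xs.length := by rw [← hfl]; simp
        omega
    have hcand := (PySem.List.le_foldl_max_int
      (PySem.List.pyRange 1 (min k (xs.length : Int) + 1) 1)
      (fun t => pvMax0 (xs.take t.toNat) * t + pvF k (xs.drop t.toNat)) 0).2
      (b.length : Int) hmem
    rw [← pvF_eq] at hcand
    have htake : xs.take ((b.length : Int)).toNat = b := by
      simp only [Int.toNat_natCast, ← hfl, List.take_left]
    have hdrop : xs.drop ((b.length : Int)).toNat = t.flatten := by
      simp only [Int.toNat_natCast, ← hfl, List.drop_left]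
    have hrest : pvScore t ≤ pvF k t.flatten :=
      ih t.flatten ⟨rfl, fun b' hb' => hblocks b' (by simp [hb'])⟩
    calc pvScore (b :: t) = pvMax0 b * (b.length : Int) + pvScore t := by
          simp [pvScore]
      _ ≤ pvMax0 b * (b.length : Int) + pvF k t.flatten := by omega
      _ = pvMax0 (xs.take ((b.length : Int)).toNat) * (b.length : Int) +
            pvF k (xs.drop ((b.length : Int)).toNat) := by rw [htake, hdrop]
      _ ≤ pvF k xs := hcand

theorem pvScore_le_pvG (k : Int) : ∀ (bs : List (List Int)) (xs : List Int),
    pvIsPart k xs bs → pvScore bs ≤ pvG k xs := by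
  intro bs
  induction bs using List.reverseRecOn with
  | nil =>
    intro xs ⟨hfl, _⟩
    simp only [List.flatten_nil] at hfl
    subst hfl
    simpa [pvScore] using pvG_nonneg k []
  | append_singleton t b ih =>
    intro xs ⟨hfl, hblocks⟩
    simp only [List.flatten_append, List.flatten_cons, List.flatten_nil, List.append_nil] at hfl
    obtain ⟨hb, hbk⟩ := hblocks b (by simp)
    have hbl : 1 ≤ b.length := List.length_pos_iff.mpr hb
    have hlen : t.flatten.length + b.length = xs.length := by
      rw [← hfl]; simp
    have hmem : (b.length : Int) ∈ PySem.List.pyRange 1 (min k (xs.length : Int) + 1) 1 := by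
      apply PySem.List.mem_pyRange_one.mpr
      constructor
      · exact_mod_cast hbl
      · omega
    have hcand := (PySem.List.le_foldl_max_int
      (PySem.List.pyRange 1 (min k (xs.length : Int) + 1) 1)
      (fun u => pvMax0 (xs.drop (xs.length - u.toNat)) * u +
        pvG k (xs.take (xs.length - u.toNat))) 0).2
      (b.length : Int) hmem
    rw [← pvG_eq] at hcand
    have hidx : xs.length - ((b.length : Int)).toNat = t.flatten.length := by
      simp only [Int.toNat_natCast]; omega
    have hdrop : xs.drop (xs.length - ((b.length : Int)).toNat) = b := by
      rw [hidx, ← hfl, List.drop_left]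
    have htake : xs.take (xs.length - ((b.length : Int)).toNat) = t.flatten := by
      rw [hidx, ← hfl, List.take_left]
    have hrest : pvScore t ≤ pvG k t.flatten :=
      ih t.flatten ⟨rfl, fun b' hb' => hblocks b' (by simp [hb'])⟩
    calc pvScore (t ++ [b]) = pvScore t + pvMax0 b * (b.length : Int) := by
          simp [pvScore]
      _ ≤ pvG k t.flatten + pvMax0 b * (b.length : Int) := by omega
      _ = pvMax0 (xs.drop (xs.length - ((b.length : Int)).toNat)) * (b.length : Int) +
            pvG k (xs.take (xs.length - ((b.length : Int)).toNat)) := by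
          rw [htake, hdrop]; ring
      _ ≤ pvG k xs := hcand

theorem pvF_attained (k : Int) (hk : 1 ≤ k) : ∀ (xs : List Int),
    ∃ bs, pvIsPart k xs bs ∧ pvF k xs = pvScore bs := by
  suffices h : ∀ (N : Nat) (xs : List Int), xs.length ≤ N →
      ∃ bs, pvIsPart k xs bs ∧ pvF k xs = pvScore bs from
    fun xs => h xs.length xs le_rfl
  intro N
  induction N with
  | zero =>
    intro xs hl
    have hx : xs = [] := List.eq_nil_of_length_eq_zero (by omega)
    subst hx
    exact ⟨[], ⟨rfl, by simp⟩, by simp [pvF_nil, pvScore]⟩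
  | succ N ih =>
    intro xs hl
    rcases xs with _ | ⟨x, xs'⟩
    · exact ⟨[], ⟨rfl, by simp⟩, by simp [pvF_nil, pvScore]⟩
    simp only [List.length_cons] at hl
    rcases pvFoldl_max_proj_init_or_mem
        (PySem.List.pyRange 1 (min k ((x :: xs').length : Int) + 1) 1)
        (fun t => pvMax0 ((x :: xs').take t.toNat) * t + pvF k ((x :: xs').drop t.toNat)) 0
      with h0 | ⟨t, ht, hcand⟩
    · -- the fold kept its seed 0; the all-singletons partition also scores 0
      have hF0 : pvF k (x :: xs') = 0 := by rw [pvF_eq]; exact h0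
      have h1mem : (1 : Int) ∈
          PySem.List.pyRange 1 (min k ((x :: xs').length : Int) + 1) 1 := by
        apply PySem.List.mem_pyRange_one.mpr
        constructor
        · omega
        · simp only [List.length_cons]
          omega
      have hc1 := (PySem.List.le_foldl_max_int
        (PySem.List.pyRange 1 (min k ((x :: xs').length : Int) + 1) 1)
        (fun t => pvMax0 ((x :: xs').take t.toNat) * t + pvF k ((x :: xs').drop t.toNat)) 0).2
        1 h1mem
      rw [← pvF_eq, hF0] at hc1
      simp only [Int.toNat_one, List.take_succ_cons, List.take_zero, List.drop_succ_cons,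
        List.drop_zero, mul_one] at hc1
      have ha := pvMax0_nonneg [x]
      have hb := pvF_nonneg k xs'
      have hax : pvMax0 [x] = 0 := by omega
      have hbx : pvF k xs' = 0 := by omega
      obtain ⟨bs', hpart', hsc'⟩ := ih xs' (by simpa using hl)
      refine ⟨[x] :: bs', ⟨?_, ?_⟩, ?_⟩
      · simp [hpart'.1]
      · intro b hb'
        rcases List.mem_cons.mp hb' with hb'' | hb''
        · subst hb''; exact ⟨by simp, by simpa using hk⟩
        · exact hpart'.2 b hb''
      · rw [hF0]
        simp only [pvScore, List.map_cons, List.sum_cons, List.length_cons, List.length_nil]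
        rw [hax]
        have : pvScore bs' = 0 := by omega
        simp only [pvScore] at this
        omega
    · -- the fold hit the candidate at block length t
      have hrng := PySem.List.mem_pyRange_one.mp ht
      simp only [List.length_cons] at hrng
      have ht1 : 1 ≤ t.toNat := by omega
      have htlen : t.toNat ≤ xs'.length + 1 := by omega
      have hF : pvF k (x :: xs') =
          pvMax0 ((x :: xs').take t.toNat) * t + pvF k ((x :: xs').drop t.toNat) := by
        rw [pvF_eq]; exact hcand
      obtain ⟨bs', hpart', hsc'⟩ := ih ((x :: xs').drop t.toNat)
        (by simp only [List.length_drop, List.length_cons]; omega)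
      refine ⟨(x :: xs').take t.toNat :: bs', ⟨?_, ?_⟩, ?_⟩
      · rw [List.flatten_cons, hpart'.1, List.take_append_drop]
      · intro b hb'
        have hlen' : ((x :: xs').take t.toNat).length = t.toNat := by
          simp only [List.length_take, List.length_cons]; omega
        rcases List.mem_cons.mp hb' with hb'' | hb''
        · subst hb''
          constructor
          · intro hnil
            rw [hnil] at hlen'
            simp at hlen'
            omega
          · rw [hlen']; omega
        · exact hpart'.2 b hb''
      · have hlt : (((x :: xs').take t.toNat).length : Int) = t := by
          simp only [List.length_take, List.length_cons]
          omega
        rw [hF, hsc']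
        simp only [pvScore, List.map_cons, List.sum_cons, hlt]

theorem pvG_attained (k : Int) (hk : 1 ≤ k) : ∀ (xs : List Int),
    ∃ bs, pvIsPart k xs bs ∧ pvG k xs = pvScore bs := by
  suffices h : ∀ (N : Nat) (xs : List Int), xs.length ≤ N →
      ∃ bs, pvIsPart k xs bs ∧ pvG k xs = pvScore bs from
    fun xs => h xs.length xs le_rfl
  intro N
  induction N with
  | zero =>
    intro xs hl
    have hx : xs = [] := List.eq_nil_of_length_eq_zero (by omega)
    subst hx
    exact ⟨[], ⟨rfl, by simp⟩, by simp [pvG_nil, pvScore]⟩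
  | succ N ih =>
    intro xs hl
    rcases hxe : xs with _ | ⟨x, xs'⟩
    · exact ⟨[], ⟨rfl, by simp⟩, by simp [pvG_nil, pvScore]⟩
    rw [← hxe]
    have hxl : 1 ≤ xs.length := by rw [hxe]; simp
    rcases pvFoldl_max_proj_init_or_mem
        (PySem.List.pyRange 1 (min k (xs.length : Int) + 1) 1)
        (fun t => pvMax0 (xs.drop (xs.length - t.toNat)) * t +
          pvG k (xs.take (xs.length - t.toNat))) 0
      with h0 | ⟨t, ht, hcand⟩
    · have hG0 : pvG k xs = 0 := by rw [pvG_eq]; exact h0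
      have h1mem : (1 : Int) ∈
          PySem.List.pyRange 1 (min k (xs.length : Int) + 1) 1 := by
        apply PySem.List.mem_pyRange_one.mpr
        omega
      have hc1 := (PySem.List.le_foldl_max_int
        (PySem.List.pyRange 1 (min k (xs.length : Int) + 1) 1)
        (fun t => pvMax0 (xs.drop (xs.length - t.toNat)) * t +
          pvG k (xs.take (xs.length - t.toNat))) 0).2 1 h1mem
      rw [← pvG_eq, hG0] at hc1
      simp only [Int.toNat_one, mul_one] at hc1
      have ha := pvMax0_nonneg (xs.drop (xs.length - 1))
      have hb := pvG_nonneg k (xs.take (xs.length - 1))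
      have hax : pvMax0 (xs.drop (xs.length - 1)) = 0 := by omega
      have hbx : pvG k (xs.take (xs.length - 1)) = 0 := by omega
      obtain ⟨bs', hpart', hsc'⟩ := ih (xs.take (xs.length - 1))
        (by simp only [List.length_take]; omega)
      refine ⟨bs' ++ [xs.drop (xs.length - 1)], ⟨?_, ?_⟩, ?_⟩
      · simp only [List.flatten_append, List.flatten_cons, List.flatten_nil, List.append_nil,
          hpart'.1, List.take_append_drop]
      · rintro b hb'
        rcases List.mem_append.mp hb' with hb'' | hb''
        · exact hpart'.2 b hb''
        · have hbeq : b = xs.drop (xs.length - 1) := by simpa using hb''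
          subst hbeq
          constructor
          · have : (xs.drop (xs.length - 1)).length = 1 := by
              simp only [List.length_drop]; omega
            exact fun hnil => by simp [hnil] at this
          · have : (xs.drop (xs.length - 1)).length = 1 := by
              simp only [List.length_drop]; omega
            rw [this]; omega
      · rw [hG0]
        simp only [pvScore, List.map_append, List.sum_append, List.map_cons, List.map_nil,
          List.sum_cons, List.sum_nil]
        rw [hax]
        have : pvScore bs' = 0 := by omega
        simp only [pvScore] at this
        omega
    · have hrng := PySem.List.mem_pyRange_one.mp ht
      have ht1 : 1 ≤ t.toNat := by omega
      have htlen : t.toNat ≤ xs.length := by omega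
      have hG : pvG k xs =
          pvMax0 (xs.drop (xs.length - t.toNat)) * t +
            pvG k (xs.take (xs.length - t.toNat)) := by
        rw [pvG_eq]; exact hcand
      obtain ⟨bs', hpart', hsc'⟩ := ih (xs.take (xs.length - t.toNat))
        (by simp only [List.length_take]; omega)
      refine ⟨bs' ++ [xs.drop (xs.length - t.toNat)], ⟨?_, ?_⟩, ?_⟩
      · simp only [List.flatten_append, List.flatten_cons, List.flatten_nil, List.append_nil,
          hpart'.1, List.take_append_drop]
      · rintro b hb'
        rcases List.mem_append.mp hb' with hb'' | hb''
        · exact hpart'.2 b hb''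
        · have hbeq : b = xs.drop (xs.length - t.toNat) := by simpa using hb''
          subst hbeq
          have hble : (xs.drop (xs.length - t.toNat)).length = t.toNat := by
            simp only [List.length_drop]; omega
          constructor
          · intro hnil
            rw [hnil] at hble
            simp at hble
            omega
          · rw [hble]; omega
      · have hlt : ((xs.drop (xs.length - t.toNat)).length : Int) = t := by
          simp only [List.length_drop]; omega
        rw [hG, hsc']
        simp only [pvScore, List.map_append, List.sum_append, List.map_cons, List.map_nil,
          List.sum_cons, List.sum_nil, hlt]
        ring

theorem pvF_eq_pvG (k : Int) (xs : List Int) : pvF k xs = pvG k xs := by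
  rcases (by omega : 1 ≤ k ∨ k ≤ 0) with hk | hk
  · obtain ⟨bs, hp, hF⟩ := pvF_attained k hk xs
    obtain ⟨cs, hq, hG⟩ := pvG_attained k hk xs
    have h1 : pvF k xs ≤ pvG k xs := hF ▸ pvScore_le_pvG k bs xs hp
    have h2 : pvG k xs ≤ pvF k xs := hG ▸ pvScore_le_pvF k cs xs hq
    omega
  · rw [pvF_of_k_nonpos k (by omega), pvG_of_k_nonpos k (by omega)]

theorem pvSet_zero_self (l : List Int) (i : Nat) (h : l.getD i 0 = 0) : l.set i 0 = l := by
  apply List.ext_getElem (by simp)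
  intro j hj hj'
  rcases eq_or_ne i j with hij | hij
  · subst hij
    rw [List.getElem_set_self]
    rw [List.getD_eq_getElem _ _ hj'] at h
    omega
  · rw [List.getElem_set_ne hij]

-- inner loop of A at row i: given the rows below i are already pvF values, it writes pvF of the suffix
theorem pvInnerA_aux (arr : List Int) (k : Int) (i : Nat) (DP : List Int)
    (hlen : DP.length = arr.length + 1)
    (hup : ∀ m : Nat, i < m → m ≤ arr.length → PySem.List.pyGetD DP (m : Int) 0 = pvF k (arr.drop m))
    (hii : PySem.List.pyGetD DP (i : Int) 0 = 0)
    (hin : i ≤ arr.length) :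
    ∀ m : Nat, m ≤ (min ((i : Int) + k) (arr.length : Int) - i).toNat →
    ((List.range m).map (fun (j : Nat) => (i : Int) + (j : Int))).foldl
        (fun (s : Int × List Int) j =>
          (max (PySem.List.pyGetD arr j 0) s.1,
           PySem.List.pySetD s.2 (i : Int)
             (max (PySem.List.pyGetD s.2 (i : Int) 0)
               (max (PySem.List.pyGetD arr j 0) s.1 * (j - (i : Int) + 1) +
                 PySem.List.pyGetD s.2 (j + 1) 0))))
        (0, DP)
      = (pvMax0 ((arr.drop i).take m),
         PySem.List.pySetD DP (i : Int)
           (((List.range m).map (fun (j : Nat) => (1 : Int) + (j : Int))).foldl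
             (fun acc t => max acc (pvMax0 ((arr.drop i).take t.toNat) * t +
               pvF k ((arr.drop i).drop t.toNat))) 0)) := by
  intro m
  induction m with
  | zero =>
    intro _
    simp only [List.range_zero, List.map_nil, List.foldl_nil, List.take_zero]
    rw [PySem.List.pySetD_natCast]
    rw [pvSet_zero_self DP i (by simpa using hii)]
    simp [pvMax0]
  | succ m ih =>
    intro hm
    have hmL : m < arr.length - i := by omega
    have himlt : i + m < arr.length := by omega
    rw [List.range_succ, List.map_append, List.map_append, List.foldl_append, List.foldl_append,
      ih (by omega)]
    simp only [List.map_cons, List.map_nil, List.foldl_cons, List.foldl_nil]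
    have harr : PySem.List.pyGetD arr ((i : Int) + (m : Int)) 0 = arr[i + m] := by
      rw [show (i : Int) + (m : Int) = ((i + m : Nat) : Int) by push_cast; omega,
        PySem.List.pyGetD_natCast, List.getD_eq_getElem _ _ himlt]
    have hdl : m < (arr.drop i).length := by simp [List.length_drop]; omega
    have htakes : (arr.drop i).take (m + 1) = (arr.drop i).take m ++ [arr[i + m]] := by
      rw [List.take_add_one]
      congr 1
      rw [List.getElem?_eq_getElem hdl]
      simp only [List.getElem_drop, Option.toList_some]
    have hv : max (PySem.List.pyGetD arr ((i : Int) + (m : Int)) 0) (pvMax0 ((arr.drop i).take m))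
        = pvMax0 ((arr.drop i).take (m + 1)) := by
      rw [htakes, pvMax0_append, harr, max_comm]
    have hilen : i < DP.length := by omega
    have hgetset : PySem.List.pyGetD (PySem.List.pySetD DP (i : Int) (((List.range m).map
        (fun (j : Nat) => (1 : Int) + (j : Int))).foldl
          (fun acc t => max acc (pvMax0 ((arr.drop i).take t.toNat) * t +
            pvF k ((arr.drop i).drop t.toNat))) 0)) (i : Int) 0
        = ((List.range m).map (fun (j : Nat) => (1 : Int) + (j : Int))).foldl
            (fun acc t => max acc (pvMax0 ((arr.drop i).take t.toNat) * t +
              pvF k ((arr.drop i).drop t.toNat))) 0 := by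
      rw [PySem.List.pySetD_natCast, PySem.List.pyGetD_natCast,
        List.getD_eq_getElem _ _ (by simpa using hilen), List.getElem_set_self]
    have hnext : PySem.List.pyGetD (PySem.List.pySetD DP (i : Int) (((List.range m).map
        (fun (j : Nat) => (1 : Int) + (j : Int))).foldl
          (fun acc t => max acc (pvMax0 ((arr.drop i).take t.toNat) * t +
            pvF k ((arr.drop i).drop t.toNat))) 0)) ((i : Int) + (m : Int) + 1) 0
        = pvF k (arr.drop (i + m + 1)) := by
      rw [PySem.List.pySetD_natCast,
        show (i : Int) + (m : Int) + 1 = ((i + m + 1 : Nat) : Int) by push_cast; omega,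
        PySem.List.pyGetD_natCast,
        List.getD_eq_getElem _ _ (by simp only [List.length_set]; omega),
        List.getElem_set_ne (by omega)]
      rw [← List.getD_eq_getElem _ 0 (by omega), ← PySem.List.pyGetD_natCast]
      exact hup (i + m + 1) (by omega) (by omega)
    rw [hv, hgetset, hnext, PySem.List.pySetD_natCast, PySem.List.pySetD_natCast, List.set_set]
    have harith : (i : Int) + (m : Int) - (i : Int) + 1 = (1 : Int) + (m : Int) := by omega
    have htoNat : ((1 : Int) + (m : Int)).toNat = m + 1 := by omega
    have hdd : (arr.drop i).drop (m + 1) = arr.drop (i + m + 1) := by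
      rw [List.drop_drop, Nat.add_assoc]
    rw [harith, htoNat, hdd, PySem.List.pySetD_natCast]

theorem pvInnerA (arr : List Int) (k : Int) (i : Nat) (DP : List Int)
    (hlen : DP.length = arr.length + 1)
    (hup : ∀ m : Nat, i < m → m ≤ arr.length → PySem.List.pyGetD DP (m : Int) 0 = pvF k (arr.drop m))
    (hii : PySem.List.pyGetD DP (i : Int) 0 = 0)
    (hin : i ≤ arr.length) :
    ((PySem.List.pyRange (i : Int) (min ((i : Int) + k) (arr.length : Int)) 1).foldl
        (fun (s : Int × List Int) j =>
          (max (PySem.List.pyGetD arr j 0) s.1,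
           PySem.List.pySetD s.2 (i : Int)
             (max (PySem.List.pyGetD s.2 (i : Int) 0)
               (max (PySem.List.pyGetD arr j 0) s.1 * (j - (i : Int) + 1) +
                 PySem.List.pyGetD s.2 (j + 1) 0))))
        (0, DP)).2
      = PySem.List.pySetD DP (i : Int) (pvF k (arr.drop i)) := by
  have hrng : PySem.List.pyRange (i : Int) (min ((i : Int) + k) (arr.length : Int)) 1
      = (List.range ((min ((i : Int) + k) (arr.length : Int) - i).toNat)).map
          (fun (j : Nat) => (i : Int) + (j : Int)) := by
    rw [PySem.List.pyRange_one]
  rw [hrng, pvInnerA_aux arr k i DP hlen hup hii hin _ le_rfl]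
  rw [pvF_eq]
  rw [show PySem.List.pyRange 1 (min k (((arr.drop i).length : Int)) + 1) 1
      = (List.range ((min ((i : Int) + k) (arr.length : Int) - i).toNat)).map
          (fun (j : Nat) => (1 : Int) + (j : Int)) by
    rw [PySem.List.pyRange_one]
    congr 2
    simp only [List.length_drop]
    omega]

theorem pvOuterA (arr : List Int) (k : Int) : ∀ m : Nat, m ≤ arr.length →
    (((List.range m).map (fun (j : Nat) => ((arr.length : Int) - 1) - (j : Int))).foldl
      (fun DP i =>
        ((PySem.List.pyRange i (min (i + k) (arr.length : Int)) 1).foldl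
          (fun (s : Int × List Int) j =>
            (max (PySem.List.pyGetD arr j 0) s.1,
             PySem.List.pySetD s.2 i
               (max (PySem.List.pyGetD s.2 i 0)
                 (max (PySem.List.pyGetD arr j 0) s.1 * (j - i + 1) +
                   PySem.List.pyGetD s.2 (j + 1) 0))))
          (0, DP)).2)
      (List.replicate (arr.length + 1) 0)).length = arr.length + 1 ∧
    ∀ jj : Nat, jj ≤ arr.length →
      PySem.List.pyGetD (((List.range m).map (fun (j : Nat) => ((arr.length : Int) - 1) - (j : Int))).foldl
        (fun DP i =>
          ((PySem.List.pyRange i (min (i + k) (arr.length : Int)) 1).foldl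
            (fun (s : Int × List Int) j =>
              (max (PySem.List.pyGetD arr j 0) s.1,
               PySem.List.pySetD s.2 i
                 (max (PySem.List.pyGetD s.2 i 0)
                   (max (PySem.List.pyGetD arr j 0) s.1 * (j - i + 1) +
                     PySem.List.pyGetD s.2 (j + 1) 0))))
            (0, DP)).2)
        (List.replicate (arr.length + 1) 0)) (jj : Int) 0
      = if arr.length - m ≤ jj then pvF k (arr.drop jj) else 0 := by
  intro m
  induction m with
  | zero =>
    intro _
    refine ⟨by simp, ?_⟩
    intro jj hjj
    simp only [List.range_zero, List.map_nil, List.foldl_nil]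
    rw [PySem.List.pyGetD_natCast]
    rw [List.getD_eq_getElem _ _ (by simp; omega), List.getElem_replicate]
    split_ifs with h
    · have hjn : jj = arr.length := by omega
      subst hjn
      rw [List.drop_length, pvF_nil]
    · rfl
  | succ m ih =>
    intro hm
    obtain ⟨ihlen, ihval⟩ := ih (by omega)
    rw [List.range_succ, List.map_append, List.foldl_append]
    simp only [List.map_cons, List.map_nil, List.foldl_cons, List.foldl_nil]
    set DPm := ((List.range m).map (fun (j : Nat) => ((arr.length : Int) - 1) - (j : Int))).foldl
      (fun DP i =>
        ((PySem.List.pyRange i (min (i + k) (arr.length : Int)) 1).foldl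
          (fun (s : Int × List Int) j =>
            (max (PySem.List.pyGetD arr j 0) s.1,
             PySem.List.pySetD s.2 i
               (max (PySem.List.pyGetD s.2 i 0)
                 (max (PySem.List.pyGetD arr j 0) s.1 * (j - i + 1) +
                   PySem.List.pyGetD s.2 (j + 1) 0))))
          (0, DP)).2)
      (List.replicate (arr.length + 1) 0) with hDPm
    have hcasti : ((arr.length : Int) - 1) - (m : Int) = ((arr.length - 1 - m : Nat) : Int) := by
      omega
    have hstep := pvInnerA arr k (arr.length - 1 - m) DPm ihlen
      (fun m' hm1 hm2 => by
        rw [ihval m' hm2]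
        rw [if_pos (by omega)])
      (by
        rw [ihval (arr.length - 1 - m) (by omega)]
        rw [if_neg (by omega)])
      (by omega)
    rw [hcasti, hstep]
    constructor
    · rw [PySem.List.pySetD_natCast]
      simp only [List.length_set]
      exact ihlen
    · intro jj hjj
      rw [PySem.List.pySetD_natCast]
      rcases eq_or_ne jj (arr.length - 1 - m) with hje | hje
      · subst hje
        rw [PySem.List.pyGetD_natCast,
          List.getD_eq_getElem _ _ (by simp only [List.length_set]; omega),
          List.getElem_set_self, if_pos (by omega)]
      · rw [PySem.List.pyGetD_natCast,
          List.getD_eq_getElem _ _ (by simp only [List.length_set]; omega),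
          List.getElem_set_ne (by omega),
          ← List.getD_eq_getElem _ 0 (by omega), ← PySem.List.pyGetD_natCast,
          ihval jj hjj]
        have : (arr.length - (m + 1) ≤ jj) ↔ (arr.length - m ≤ jj) := by omega
        rw [if_congr this rfl rfl]

theorem solve_eq_pvF (arr : List Int) (k : Int) : solve arr k = pvF k arr := by
  show PySem.List.pyGetD
    ((PySem.List.pyRange ((arr.length : Int) - 1) (-1) (-1)).foldl _
      (List.replicate ((arr.length : Int).toNat + 1) 0)) 0 0 = _
  rw [show ((arr.length : Int).toNat + 1) = arr.length + 1 by simp]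
  rw [show PySem.List.pyRange ((arr.length : Int) - 1) (-1) (-1)
      = (List.range arr.length).map (fun (j : Nat) => ((arr.length : Int) - 1) - (j : Int)) by
    rw [PySem.List.pyRange_neg_one,
      show ((arr.length : Int) - 1 - -1).toNat = arr.length by omega]]
  have h := (pvOuterA arr k arr.length le_rfl).2 0 (by omega)
  rw [show ((0 : Nat) : Int) = (0 : Int) by simp] at h
  rw [h, if_pos (by omega), List.drop_zero]

-- ===================== B side =====================

-- row t of the window-max table: entry i is the 0-seeded max of arr[i..i+t-1]
def pvRow (arr : List Int) (t : Nat) : List Int :=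
  (List.range (arr.length - t + 1)).map (fun i => pvMax0 ((arr.drop i).take t))

theorem pvRow_getD (arr : List Int) (t i : Nat) (h1 : i < arr.length - t + 1) :
    PySem.List.pyGetD (pvRow arr t) (i : Int) 0 = pvMax0 ((arr.drop i).take t) := by
  rw [PySem.List.pyGetD_natCast, pvRow,
    List.getD_eq_getElem _ _ (by simpa using h1)]
  simp

theorem pvRow_one (arr : List Int) (h : 1 ≤ arr.length) :
    arr.map (fun x => max x 0) = pvRow arr 1 := by
  apply List.ext_getElem (by simp [pvRow]; omega)
  intro i hi hi'
  have hlen : i < arr.length := by simpa using hi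
  simp only [pvRow, List.getElem_map, List.getElem_range]
  have h1 : (arr.drop i).take 1 = [arr[i]] := by
    rw [List.take_one, List.head?_drop, List.getElem?_eq_getElem hlen]
    rfl
  rw [h1]
  simp [pvMax0, max_comm]

theorem pvRow_step (arr : List Int) (s : Nat) (hsn : s + 2 ≤ arr.length) :
    (PySem.List.pyRange 0 ((arr.length : Int) - ((2 : Int) + (s : Int)) + 1) 1).map
      (fun i => max (PySem.List.pyGetD (pvRow arr (s + 1)) i 0)
        (PySem.List.pyGetD arr (i + ((2 : Int) + (s : Int)) - 1) 0))
    = pvRow arr (s + 2) := by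
  rw [show PySem.List.pyRange 0 ((arr.length : Int) - ((2 : Int) + (s : Int)) + 1) 1
      = (List.range (arr.length - s - 1)).map (fun (j : Nat) => (0 : Int) + (j : Int)) by
    rw [PySem.List.pyRange_one]
    congr 2
    omega]
  have hR : pvRow arr (s + 2)
      = (List.range (arr.length - s - 1)).map (fun i => pvMax0 ((arr.drop i).take (s + 2))) := by
    rw [pvRow, show arr.length - (s + 2) + 1 = arr.length - s - 1 by omega]
  rw [hR, List.map_map]
  apply List.map_congr_left
  intro i hi
  have hilt : i < arr.length - s - 1 := List.mem_range.mp hi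
  simp only [Function.comp]
  have h0i : (0 : Int) + (i : Int) = ((i : Nat) : Int) := by omega
  rw [h0i, pvRow_getD arr (s + 1) i (by omega)]
  have harr : PySem.List.pyGetD arr ((i : Int) + ((2 : Int) + (s : Int)) - 1) 0
      = arr[i + s + 1]'(by omega) := by
    rw [show (i : Int) + ((2 : Int) + (s : Int)) - 1 = ((i + s + 1 : Nat) : Int) by push_cast; omega,
      PySem.List.pyGetD_natCast, List.getD_eq_getElem _ _ (by omega)]
  rw [harr]
  have hdl : s + 1 < (arr.drop i).length := by simp [List.length_drop]; omega
  have htakes : (arr.drop i).take (s + 2) = (arr.drop i).take (s + 1) ++ [arr[i + s + 1]'(by omega)] := by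
    rw [show s + 2 = (s + 1) + 1 by omega, List.take_add_one]
    congr 1
    rw [List.getElem?_eq_getElem hdl]
    simp only [List.getElem_drop, Option.toList_some]
    congr 2
  rw [htakes, pvMax0_append]

-- the fold of _window_maxes builds exactly the rows pvRow 1 .. pvRow (m+1)
theorem pvWfold (arr : List Int) : ∀ m : Nat, m + 1 ≤ arr.length →
    ((List.range m).map (fun (j : Nat) => (2 : Int) + (j : Int))).foldl
      (fun (s : List Int × List (List Int)) t =>
        let row := (PySem.List.pyRange 0 ((arr.length : Int) - t + 1) 1).map
          (fun i => max (PySem.List.pyGetD s.1 i 0) (PySem.List.pyGetD arr (i + t - 1) 0))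
        (row, s.2 ++ [row]))
      (pvRow arr 1, [pvRow arr 1])
    = (pvRow arr (m + 1), (List.range (m + 1)).map (fun j => pvRow arr (j + 1))) := by
  intro m
  induction m with
  | zero => intro _; simp
  | succ m ih =>
    intro hm
    rw [List.range_succ, List.map_append, List.foldl_append, ih (by omega)]
    simp only [List.map_cons, List.map_nil, List.foldl_cons, List.foldl_nil]
    rw [pvRow_step arr m (by omega)]
    rw [show (List.range (m + 1 + 1)).map (fun j => pvRow arr (j + 1))
        = (List.range (m + 1)).map (fun j => pvRow arr (j + 1)) ++ [pvRow arr (m + 2)] by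
      rw [List.range_succ, List.map_append]; rfl]

theorem pvBRows_eq (arr : List Int) (Kn : Nat) (hK1 : 1 ≤ Kn) (hKn : Kn ≤ arr.length) :
    pvBRows arr (Kn : Int) = (List.range Kn).map (fun j => pvRow arr (j + 1)) := by
  rw [pvBRows]
  rw [show PySem.List.pyRange 2 ((Kn : Int) + 1) 1
      = (List.range (Kn - 1)).map (fun (j : Nat) => (2 : Int) + (j : Int)) by
    rw [PySem.List.pyRange_one]
    congr 2
    omega]
  rw [pvRow_one arr (by omega)]
  rw [pvWfold arr (Kn - 1) (by omega)]
  rw [show Kn - 1 + 1 = Kn by omega]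

-- inner step of _dp: the generator's max equals pvG of the prefix
theorem pvInnerB (arr : List Int) (k : Int) (Kn : Nat)
    (hKk : (Kn : Int) = min k (arr.length : Int)) (hK1 : 1 ≤ Kn)
    (i : Nat) (hi1 : 1 ≤ i) (hin : i ≤ arr.length) (g : List Int)
    (hg : ∀ m : Nat, m < i → PySem.List.pyGetD g (m : Int) 0 = pvG k (arr.take m)) :
    (PySem.List.max? ((PySem.List.pyRange 1 (min (Kn : Int) (i : Int) + 1) 1).map
      (fun t => PySem.List.pyGetD (PySem.List.pyGetD
          ((List.range Kn).map (fun j => pvRow arr (j + 1))) (t - 1) []) ((i : Int) - t) 0 * t +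
        PySem.List.pyGetD g ((i : Int) - t) 0)) (fun y => y)).getD 0
    = pvG k (arr.take i) := by
  have hti : (arr.take i).length = i := by simp; omega
  have hcands : ((PySem.List.pyRange 1 (min (Kn : Int) (i : Int) + 1) 1).map
      (fun t => PySem.List.pyGetD (PySem.List.pyGetD
          ((List.range Kn).map (fun j => pvRow arr (j + 1))) (t - 1) []) ((i : Int) - t) 0 * t +
        PySem.List.pyGetD g ((i : Int) - t) 0))
      = ((PySem.List.pyRange 1 (min (Kn : Int) (i : Int) + 1) 1).map
      (fun t => pvMax0 ((arr.take i).drop ((arr.take i).length - t.toNat)) * t +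
        pvG k ((arr.take i).take ((arr.take i).length - t.toNat)))) := by
    apply List.map_congr_left
    intro t ht
    obtain ⟨ht1, ht2⟩ := PySem.List.mem_pyRange_one.mp ht
    have htK : t ≤ (Kn : Int) := by omega
    have hti' : t ≤ (i : Int) := by omega
    have htn : t.toNat ≤ arr.length := by omega
    have hW : PySem.List.pyGetD ((List.range Kn).map (fun j => pvRow arr (j + 1))) (t - 1) []
        = pvRow arr t.toNat := by
      rw [show t - 1 = ((t.toNat - 1 : Nat) : Int) by omega, PySem.List.pyGetD_natCast,
        List.getD_eq_getElem _ _ (by simp; omega)]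
      simp only [List.getElem_map, List.getElem_range]
      congr 1
      omega
    rw [hW]
    rw [show (i : Int) - t = ((i - t.toNat : Nat) : Int) by omega]
    rw [pvRow_getD arr t.toNat (i - t.toNat) (by omega)]
    rw [hg (i - t.toNat) (by omega)]
    have hdt : (arr.take i).drop ((arr.take i).length - t.toNat)
        = (arr.drop (i - t.toNat)).take t.toNat := by
      rw [hti, List.drop_take]
      congr 1
      omega
    have htt : (arr.take i).take ((arr.take i).length - t.toNat) = arr.take (i - t.toNat) := by
      rw [hti, List.take_take]
      congr 1
      omega

    rw [hdt, htt]
  rw [hcands]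
  have hM1 : 1 ≤ (min (Kn : Int) (i : Int)).toNat := by omega
  have hrng : PySem.List.pyRange 1 (min (Kn : Int) (i : Int) + 1) 1
      = (List.range ((min (Kn : Int) (i : Int)).toNat)).map (fun (j : Nat) => (1 : Int) + (j : Int)) := by
    rw [PySem.List.pyRange_one]
    congr 2
    omega
  have hr2 : PySem.List.pyRange 1 (min k ((arr.take i).length : Int) + 1) 1
      = PySem.List.pyRange 1 (min (Kn : Int) (i : Int) + 1) 1 := by
    have hti' : ((arr.take i).length : Int) = (i : Int) := by rw [hti]
    rw [hti']
    congr 1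
    omega
  have hGfold : pvG k (arr.take i)
      = ((PySem.List.pyRange 1 (min (Kn : Int) (i : Int) + 1) 1).map
          (fun t => pvMax0 ((arr.take i).drop ((arr.take i).length - t.toNat)) * t +
            pvG k ((arr.take i).take ((arr.take i).length - t.toNat)))).foldl max 0 := by
    rw [pvG_eq, hr2, List.foldl_map]
  obtain ⟨M, hMe⟩ : ∃ M, (min (Kn : Int) (i : Int)).toNat = M + 1 :=
    ⟨(min (Kn : Int) (i : Int)).toNat - 1, by omega⟩
  rw [hrng, hMe, List.range_succ_eq_map, List.map_cons, List.map_cons] at hGfold ⊢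
  set f : Int → Int := fun t => pvMax0 ((arr.take i).drop ((arr.take i).length - t.toNat)) * t +
    pvG k ((arr.take i).take ((arr.take i).length - t.toNat)) with hf
  have hc0 : 0 ≤ f ((1 : Int) + ((0 : Nat) : Int)) := by
    rw [hf]
    refine add_nonneg (mul_nonneg (pvMax0_nonneg _) (by norm_num)) (pvG_nonneg _ _)
  rw [PySem.List.max?_id_cons, Option.getD_some]
  rw [hGfold]
  simp only [List.foldl_cons]
  rw [max_eq_right hc0]

-- outer loop of _dp: g grows into the table of pvG values of all prefixes
theorem pvOuterB (arr : List Int) (k : Int) (Kn : Nat)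
    (hKk : (Kn : Int) = min k (arr.length : Int)) (hK1 : 1 ≤ Kn) :
    ∀ m : Nat, m ≤ arr.length →
    ((List.range m).map (fun (j : Nat) => (1 : Int) + (j : Int))).foldl
      (fun g i =>
        g ++ [(PySem.List.max? ((PySem.List.pyRange 1 (min (Kn : Int) i + 1) 1).map
          (fun t => PySem.List.pyGetD (PySem.List.pyGetD
              ((List.range Kn).map (fun j => pvRow arr (j + 1))) (t - 1) []) (i - t) 0 * t +
            PySem.List.pyGetD g (i - t) 0)) (fun y => y)).getD 0])
      [0]
    = (List.range (m + 1)).map (fun i => pvG k (arr.take i)) := by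
  intro m
  induction m with
  | zero => intro _; simp [pvG_nil]
  | succ m ih =>
    intro hm
    rw [List.range_succ, List.map_append, List.foldl_append, ih (by omega)]
    simp only [List.map_cons, List.map_nil, List.foldl_cons, List.foldl_nil]
    have hg : ∀ m' : Nat, m' < m + 1 →
        PySem.List.pyGetD ((List.range (m + 1)).map (fun i => pvG k (arr.take i))) (m' : Int) 0
          = pvG k (arr.take m') := by
      intro m' hm'
      rw [PySem.List.pyGetD_natCast, List.getD_eq_getElem _ _ (by simpa using hm')]
      simp
    have hstep := pvInnerB arr k Kn hKk hK1 (m + 1) (by omega) (by omega)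
      ((List.range (m + 1)).map (fun i => pvG k (arr.take i))) hg
    have hcast : ((1 : Int) + (m : Int)) = ((m + 1 : Nat) : Int) := by push_cast; omega
    rw [hcast, hstep]
    simp [List.range_succ]

theorem solve_alt_eq_pvG (arr : List Int) (k : Int) : solve_alt arr k = pvG k arr := by
  by_cases hK : min k (arr.length : Int) < 1
  · rw [solve_alt]
    simp only [if_pos hK]
    rcases (by omega : k ≤ 0 ∨ (arr.length : Int) < 1) with hk | hn
    · rw [pvG_of_k_nonpos k hk]
    · have : arr = [] := List.eq_nil_of_length_eq_zero (by omega)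
      rw [this, pvG_nil]
  · rw [solve_alt]
    simp only [if_neg hK]
    have hK1 : 1 ≤ min k (arr.length : Int) := by omega
    set Kn : Nat := (min k (arr.length : Int)).toNat with hKn
    have hKk : (Kn : Int) = min k (arr.length : Int) := by omega
    have hKle : Kn ≤ arr.length := by omega
    rw [← hKk, pvBRows_eq arr Kn (by omega) hKle, pvBDP]
    rw [show PySem.List.pyRange 1 ((arr.length : Int) + 1) 1
        = (List.range arr.length).map (fun (j : Nat) => (1 : Int) + (j : Int)) by
      rw [PySem.List.pyRange_one]
      congr 2
      omega]
    rw [pvOuterB arr k Kn hKk (by omega) arr.length le_rfl]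
    rw [PySem.List.pyGetD_natCast, List.getD_eq_getElem _ _ (by simp)]
    simp

-- ===== VERDICT (by name: the statement is the Claim_ definition above) =====
theorem solve_spec : Claim_equal_solve := by
  intro arr k _
  unfold Spec_solve
  rw [solve_eq_pvF, solve_alt_eq_pvG, pvF_eq_pvG]
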